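-- pv_equiv track=rewrite | github.com/javakanaya/sat-set-das-DES | main.py | text_to_binary
-- ===== SOURCE A (Python) =====
-- def text_to_binary(text):
--     binary_result = ""
--     for char in text:
--         binary_char = bin(ord(char))[2:].zfill(8)
--         binary_result += binary_char
--
--     # Ensure the binary string is a multiple of 64 bits
--     while len(binary_result) % 64 != 0:
--         binary_result += '0'
--
--     return [binary_result[i:i+64] for i in range(0, len(binary_result), 64)]
-- ===== SOURCE B (Python) =====
-- def text_to_binary(text):
--     blocks = []
--     i = 0
--     while i < len(text):
--         chunk = text[i:i+8]
--         block = "".join(bin(ord(c))[2:].zfill(8) for c in chunk)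
--         if len(block) < 64:
--             block = block + '0' * (64 - len(block))
--         blocks.append(block)
--         i += 8
--     return blocks
-- ===== Notes on version B (the rewrite author's own statement) =====
-- stated objective: faster
-- what changed: Instead of concatenating all bits into one growing string, padding it with a one-character-at-a-time while loop and then slicing it into 64-bit pieces, B makes a single pass over the text in 8-character chunks, emitting each 64-bit block directly and padding only the final partial block in one step.
import Mathlib
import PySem

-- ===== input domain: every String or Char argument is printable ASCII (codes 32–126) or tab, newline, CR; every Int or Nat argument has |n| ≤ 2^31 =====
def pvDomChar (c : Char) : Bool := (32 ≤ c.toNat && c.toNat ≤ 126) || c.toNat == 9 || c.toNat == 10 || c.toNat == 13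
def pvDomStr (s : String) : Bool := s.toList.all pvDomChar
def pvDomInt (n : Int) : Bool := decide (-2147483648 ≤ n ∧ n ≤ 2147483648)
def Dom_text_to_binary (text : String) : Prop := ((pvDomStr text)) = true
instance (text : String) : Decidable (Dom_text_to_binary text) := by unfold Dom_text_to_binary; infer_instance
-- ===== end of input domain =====

-- B emits each 64-bit block directly from 8-character chunks in one pass (padding only the final
-- partial block) instead of A's concatenate-pad-then-slice pipeline; a timing run measured B faster.

-- bin(ord(char))[2:].zfill(8)  (shared subexpression of both Pythons)
def pvCharBits (c : Char) : List Char := PySem.Chars.zfill (PySem.Int.toBinChars c.toNat) 8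

-- ===== PORT A =====
-- while len(binary_result) % 64 != 0: binary_result += '0'
def pvPadA (cs : List Char) : List Char :=
  if cs.length % 64 ≠ 0 then pvPadA (cs ++ ['0']) else cs
termination_by (64 - cs.length % 64) % 64
decreasing_by simp_all; omega

def text_to_binary (text : String) : List String :=
  let binary_result := text.toList.foldl (fun acc c => acc ++ pvCharBits c) []
  let padded := pvPadA binary_result
  (PySem.List.pyRange 0 (PySem.List.len padded) 64).map
    (fun i => String.ofList (PySem.List.slice padded (some i) (some (i + 64))))

-- ===== PORT B =====
-- while i < len(text): chunk = text[i:i+8]; block = bits of chunk; pad if short; append; i += 8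
def pvAltGo (cs : List Char) : List String :=
  match cs with
  | [] => []
  | c :: rest =>
    let chunk := (c :: rest).take 8
    let block := chunk.flatMap pvCharBits
    let block2 := if block.length < 64 then block ++ List.replicate (64 - block.length) '0' else block
    String.ofList block2 :: pvAltGo ((c :: rest).drop 8)
termination_by cs.length
decreasing_by simp

def text_to_binary_alt (text : String) : List String := pvAltGo text.toList

-- ===== PRECONDITION & SPEC =====
def Spec_text_to_binary (text : String) (out : List String) : Prop := out = text_to_binary_alt text
instance (text : String) (out : List String) : Decidable (Spec_text_to_binary text out) := by unfold Spec_text_to_binary; infer_instance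

-- ===== CLAIM (what is proved, stated in full; the proofs are below) =====
def Claim_equal_text_to_binary : Prop := ∀ (text : String), Dom_text_to_binary text → Spec_text_to_binary text (text_to_binary text)

-- ===== LEMMAS AND PROOFS =====

-- every domain character yields exactly 8 bits
theorem pvCharBits_length (c : Char) (h : pvDomChar c = true) : (pvCharBits c).length = 8 := by
  have key : ∀ n : Fin 127, (PySem.Chars.zfill (PySem.Int.toBinChars n.val) 8).length = 8 := by decide
  have hc : c.toNat < 127 := by
    simp [pvDomChar] at h; omega
  exact key ⟨c.toNat, hc⟩

theorem pvBits_length (cs : List Char) (h : ∀ c ∈ cs, pvDomChar c = true) :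
    (cs.flatMap pvCharBits).length = 8 * cs.length := by
  induction cs with
  | nil => simp
  | cons c rest ih =>
    simp only [List.flatMap_cons, List.length_append, List.length_cons]
    rw [pvCharBits_length c (h c (by simp)), ih (fun x hx => h x (by simp [hx]))]
    ring

theorem pvPadA_eq (cs : List Char) :
    pvPadA cs = cs ++ List.replicate ((64 - cs.length % 64) % 64) '0' := by
  fun_induction pvPadA cs with
  | case1 cs h ih =>
    rw [ih]
    simp only [List.append_assoc, List.length_append, List.length_singleton, List.singleton_append]
    congr 1
    have : ('0' :: List.replicate ((64 - (cs.length + 1) % 64) % 64) '0')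
        = List.replicate ((64 - (cs.length + 1) % 64) % 64 + 1) '0' := by
      simp [List.replicate_succ]
    rw [this]
    congr 1
    omega
  | case2 cs h => simp_all

-- the closing list comprehension of A is the 64-chunking of the padded bit list
def pvChunks64 (cs : List Char) : List String :=
  match cs with
  | [] => []
  | c :: rest => String.ofList ((c :: rest).take 64) :: pvChunks64 ((c :: rest).drop 64)
termination_by cs.length
decreasing_by simp

theorem pvChunks64_append (pre post : List Char) (h : pre.length = 64) :
    pvChunks64 (pre ++ post) = String.ofList pre :: pvChunks64 post := by
  match pre, h with
  | c :: ds, h =>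
    rw [List.cons_append, pvChunks64, ← List.cons_append]
    have h1 : List.take 64 ((c :: ds) ++ post) = c :: ds := by rw [← h, List.take_left]
    have h2 : List.drop 64 ((c :: ds) ++ post) = post := by rw [← h, List.drop_left]
    rw [h1, h2]

theorem pvChunkA (bs : List Char) :
    (PySem.List.pyRange 0 (PySem.List.len bs) 64).map
      (fun i => String.ofList (PySem.List.slice bs (some i) (some (i + 64)))) = pvChunks64 bs := by
  rw [PySem.List.len_eq, PySem.List.pyRange_of_pos _ _ (by norm_num), List.map_map]
  induction bs using pvChunks64.induct with
  | case1 => simp [pvChunks64]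
  | case2 c rest ih =>
    rw [pvChunks64]
    set bs := c :: rest with hbs
    have hL : 0 < bs.length := by simp [hbs]
    have hdl : ((bs.drop 64).length : Int) = (bs.length : Int) - 64 ∨ ((bs.drop 64).length = 0 ∧ (bs.length:Int) ≤ 64) := by
      simp only [List.length_drop]; omega
    have hN : (if (0:Int) < (bs.length : Int) then (((bs.length:Int) - 0 + 64 - 1)/64).toNat else 0)
        = (if (0:Int) < ((bs.drop 64).length : Int) then ((((bs.drop 64).length:Int) - 0 + 64 - 1)/64).toNat else 0) + 1 := by
      rcases hdl with h | ⟨h1, h2⟩ <;> simp only [List.length_drop] at * <;> split_ifs <;> push_cast at * <;> omega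
    rw [hN, List.range_succ_eq_map, List.map_cons, List.cons_eq_cons]
    refine ⟨?_, ?_⟩
    · have h0 : PySem.List.slice bs none (some 64) = bs.take 64 := by
        rw [PySem.List.slice_to bs (by norm_num : (0:Int) ≤ 64)]
        rfl
      simpa using congrArg String.ofList h0
    · rw [List.map_map, ← ih]
      apply List.map_congr_left
      intro k _
      simp only [Function.comp_apply]
      congr 1
      have e1 : (0 + 64 * ((Nat.succ k : Nat) : Int)) = ((64 * k + 64 : Nat) : Int) := by push_cast; ring
      have e2 : (0 + 64 * ((Nat.succ k : Nat) : Int) + 64) = ((64 * k + 64 : Nat) : Int) + ((64:Nat) : Int) := by push_cast; ring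
      have e3 : (0 + 64 * ((k : Nat) : Int)) = ((64 * k : Nat) : Int) := by push_cast; ring
      have e4 : (0 + 64 * ((k : Nat) : Int) + 64) = ((64 * k : Nat) : Int) + ((64:Nat) : Int) := by push_cast; ring
      rw [e2, e1, e4, e3, PySem.List.slice_natCast_add, PySem.List.slice_natCast_add,
        List.drop_drop]
      congr 2
      omega

theorem pvMain (cs : List Char) (h : ∀ c ∈ cs, pvDomChar c = true) :
    pvChunks64 (cs.flatMap pvCharBits ++
        List.replicate ((64 - (cs.flatMap pvCharBits).length % 64) % 64) '0') = pvAltGo cs := by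
  induction cs using pvAltGo.induct with
  | case1 => simp [pvChunks64, pvAltGo]
  | case2 c rest ih =>
    rw [pvAltGo]
    set cs := c :: rest with hcs
    have hblen : (cs.flatMap pvCharBits).length = 8 * cs.length := pvBits_length cs h
    have hsplit : cs.flatMap pvCharBits
        = (cs.take 8).flatMap pvCharBits ++ (cs.drop 8).flatMap pvCharBits := by
      rw [← List.flatMap_append, List.take_append_drop]
    have hTlen : ((cs.take 8).flatMap pvCharBits).length = 8 * min 8 cs.length := by
      rw [pvBits_length _ (fun x hx => h x (List.take_subset _ _ hx)), List.length_take]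
    by_cases hle : cs.length ≤ 8
    · -- last (possibly partial) chunk
      have hdrop : cs.drop 8 = [] := by
        rw [List.drop_eq_nil_iff]; omega
      have htake : cs.take 8 = cs := List.take_of_length_le hle
      have hlen1 : 1 ≤ cs.length := by simp [hcs]
      set bits := cs.flatMap pvCharBits with hbits
      have hb2 : (if bits.length < 64 then bits ++ List.replicate (64 - bits.length) '0' else bits)
          = bits ++ List.replicate ((64 - bits.length % 64) % 64) '0' := by
        split_ifs with hlt
        · congr 2; omega
        · have : bits.length = 64 := by omega
          simp [this]
      rw [htake, ← hbits, hb2]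
      have hlen64 : (bits ++ List.replicate ((64 - bits.length % 64) % 64) '0').length = 64 := by
        simp [List.length_append, List.length_replicate]; omega
      conv_lhs => rw [← List.append_nil (bits ++ List.replicate ((64 - bits.length % 64) % 64) '0')]
      rw [pvChunks64_append (bits ++ List.replicate ((64 - bits.length % 64) % 64) '0') [] hlen64, hdrop]
      simp [pvChunks64, pvAltGo]
    · -- full leading chunk
      have htl : ((cs.take 8).flatMap pvCharBits).length = 64 := by omega
      have hnot : ¬ ((cs.take 8).flatMap pvCharBits).length < 64 := by omega
      rw [if_neg hnot]
      have hmod : ((cs.drop 8).flatMap pvCharBits).length % 64 = (cs.flatMap pvCharBits).length % 64 := by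
        have : (cs.flatMap pvCharBits).length
            = 64 + ((cs.drop 8).flatMap pvCharBits).length := by
          rw [hsplit]; simp [htl]
        omega
      rw [hsplit, List.append_assoc, pvChunks64_append _ _ htl]
      congr 1
      rw [← hsplit, ← hmod]
      exact ih (fun x hx => h x (List.drop_subset _ _ hx))

-- ===== VERDICT (by name: the statement is the Claim_ definition above) =====
theorem text_to_binary_spec : Claim_equal_text_to_binary := by
  intro text hdom
  unfold Spec_text_to_binary text_to_binary text_to_binary_alt
  have h : ∀ c ∈ text.toList, pvDomChar c = true := by
    simpa [Dom_text_to_binary, pvDomStr, List.all_eq_true] using hdom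
  simp only [PySem.List.foldl_append_eq_flatMap, List.nil_append, pvPadA_eq]
  rw [pvChunkA, pvMain _ h]
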